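-- pv_equiv track=rewrite | github.com/mahditaharb-maker/myfiles | python1/5 (3).py | find_all_triples
-- ===== SOURCE A (Python) =====
-- import math
--
-- def find_all_triples(p):
--     """
--     Return a list of all nontrivial (a, b, c) with a, b, c > 1
--     such that a^(b·c) ≡ -1 (mod p).
--     """
--     target = p - 1         # -1 mod p
--     cycle  = p - 1         # exponent cycle by Fermat
--     triples = []
--
--     for a in range(2, p):
--         if math.gcd(a, p) != 1:
--             continue
--         for b in range(2, p):
--             bm = b % cycle
--             for c in range(2, p):
--                 e = (bm * (c % cycle)) % cycle
--                 if pow(a, e, p) == target: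
--                     triples.append((a, b, c))
--     return triples
-- ===== SOURCE B (Python) =====
-- import math
--
-- def _neg_exponents(a, p):
--     """Set of e in [0, p-1) with a**e congruent to minus one mod p, by iterated multiplication."""
--     hits, x = set(), 1 % p
--     for e in range(p - 1):
--         if x == p - 1:
--             hits.add(e)
--         x = x * a % p
--     return hits
--
-- def find_all_triples(p):
--     """
--     Return a list of all nontrivial (a, b, c) with a, b, c > 1
--     such that a**(b*c) is congruent to minus one mod p.
--
--     For each coprime base a, compute once the set of exponent residues whose
--     power is minus one; then collect the (b, c) pairs whose product residue lies in
--     that set by a comprehension -- no modular exponentiation in the inner loop.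
--     """
--     cycle = p - 1
--     out = []
--     for a in range(2, p):
--         if math.gcd(a, p) == 1:
--             hits = _neg_exponents(a, p)
--             out += [(a, b, c) for b in range(2, p) for c in range(2, p)
--                     if b * c % cycle in hits]
--     return out
-- ===== Notes on version B (the rewrite author's own statement) =====
-- stated objective: alternative
-- what changed: B replaces the innermost pow(a,e,p) call by a set-membership test: a helper builds once per base a the set of exponent residues whose power is minus one mod p (one pass of modular multiplications), and the (b,c) pairs are collected by a comprehension over that set; intended to cut the log factor, but both remain cubic so no speed-up is claimed at the measured sizes.
import Mathlib
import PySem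

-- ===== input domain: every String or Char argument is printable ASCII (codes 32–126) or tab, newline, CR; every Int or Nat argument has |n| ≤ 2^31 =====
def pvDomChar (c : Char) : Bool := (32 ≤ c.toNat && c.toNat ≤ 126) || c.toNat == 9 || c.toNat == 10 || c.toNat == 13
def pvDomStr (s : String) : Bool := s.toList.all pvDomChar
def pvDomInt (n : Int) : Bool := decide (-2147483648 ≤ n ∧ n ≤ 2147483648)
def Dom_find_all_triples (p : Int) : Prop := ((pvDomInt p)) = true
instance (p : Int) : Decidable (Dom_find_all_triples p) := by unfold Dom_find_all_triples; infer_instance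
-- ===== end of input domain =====

-- B computes, per coprime base a, the SET of exponent residues whose power is minus one mod p
-- (one pass of modular multiplications), then collects the matching (b,c) pairs by a
-- comprehension (membership test) — no modular exponentiation in the inner loop (objective: alternative).

-- ===== PORT A =====
-- math.gcd(a, p) = gcd of absolute values, nonnegative: exactly Int.gcd.
def find_all_triples (p : Int) : List (List Int) :=
  let target := p - 1
  let cycle := p - 1
  (PySem.List.pyRange 2 p 1).foldl (fun triples a =>
    if Int.gcd a p ≠ 1 then triples else
    (PySem.List.pyRange 2 p 1).foldl (fun triples b =>
      let bm := PySem.Int.mod b cycle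
      (PySem.List.pyRange 2 p 1).foldl (fun triples c =>
        let e := PySem.Int.mod (bm * PySem.Int.mod c cycle) cycle
        if PySem.Int.powMod a e.toNat p == target then triples ++ [[a, b, c]] else triples)
        triples) triples) []

-- ===== PORT B =====
-- _neg_exponents(a, p): the loop carries the pair (hits, x); hits is a Python set.
def pvNegExps (a p : Int) : PySem.Set Int :=
  ((PySem.List.pyRange 0 (p - 1) 1).foldl
    (fun st e => ((if st.2 == p - 1 then PySem.Set.add st.1 e else st.1),
                  PySem.Int.mod (st.2 * a) p))
    (PySem.Set.empty, PySem.Int.mod 1 p)).1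

def find_all_triples_alt (p : Int) : List (List Int) :=
  let cycle := p - 1
  (PySem.List.pyRange 2 p 1).foldl (fun out a =>
    if Int.gcd a p == 1 then
      let hits := pvNegExps a p
      out ++ (PySem.List.pyRange 2 p 1).flatMap (fun b =>
        ((PySem.List.pyRange 2 p 1).filter
          (fun c => PySem.Set.contains hits (PySem.Int.mod (b * c) cycle))).map
          (fun c => [a, b, c]))
    else out) []

-- ===== PRECONDITION & SPEC =====
def Spec_find_all_triples (p : Int) (out : List (List Int)) : Prop := out = find_all_triples_alt p
instance (p : Int) (out : List (List Int)) : Decidable (Spec_find_all_triples p out) := by unfold Spec_find_all_triples; infer_instance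

-- ===== CLAIM (what is proved, stated in full; the proofs are below) =====
def Claim_equal_find_all_triples : Prop := ∀ (p : Int), Dom_find_all_triples p → Spec_find_all_triples p (find_all_triples p)

-- ===== LEMMAS AND PROOFS =====

-- the (hits, x) loop of _neg_exponents computes the filtered range and x = a^n % p
lemma pvNegExps_fold (a p : Int) (hp : 0 < p) (n : Nat) :
    ((PySem.List.pyRange 0 (n : Int) 1).foldl
      (fun st e => ((if st.2 == p - 1 then PySem.Set.add st.1 e else st.1),
                    PySem.Int.mod (st.2 * a) p))
      (PySem.Set.empty, PySem.Int.mod 1 p))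
    = ((PySem.List.pyRange 0 (n : Int) 1).filter (fun e => a ^ e.toNat % p == p - 1),
       a ^ n % p) := by
  induction n with
  | zero =>
    simp [PySem.List.pyRange_one_eq_nil (by omega : (0:Int) ≥ 0), PySem.Set.empty,
      PySem.Int.mod_eq_emod_of_pos hp]
  | succ n ih =>
    have hcast : ((n + 1 : Nat) : Int) = (n : Int) + 1 := by push_cast; ring
    rw [hcast, PySem.List.pyRange_one_succ_right (by positivity), List.foldl_append,
      List.filter_append, ih]
    simp only [List.foldl_cons, List.foldl_nil, List.filter_cons, List.filter_nil,
      Prod.mk.injEq, Int.toNat_natCast]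
    refine ⟨?_, ?_⟩
    · by_cases h : a ^ n % p == p - 1
      · rw [if_pos h, if_pos h, PySem.Set.add, if_neg ?_]
        · intro hc
          simp [PySem.List.mem_pyRange_one] at hc
      · rw [if_neg (by simp [h]), if_neg (by simp [h]), List.append_nil]
    · rw [PySem.Int.mod_eq_emod_of_pos hp]
      rw [Int.mul_emod, Int.emod_emod_of_dvd _ dvd_rfl, ← Int.mul_emod, pow_succ]

lemma pvNegExps_eq_filter (a p : Int) (hp : 0 < p) :
    pvNegExps a p = (PySem.List.pyRange 0 (p - 1) 1).filter
      (fun e => a ^ e.toNat % p == p - 1) := by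
  unfold pvNegExps
  by_cases h : 1 ≤ p - 1
  · have hfold := pvNegExps_fold a p hp (p - 1).toNat
    have hN : (((p - 1).toNat : Nat) : Int) = p - 1 := by omega
    rw [hN] at hfold
    rw [hfold]
  · have hnil : PySem.List.pyRange 0 (p - 1) 1 = [] :=
      PySem.List.pyRange_one_eq_nil (by omega)
    simp [hnil, PySem.Set.empty]

-- membership in the hits set, for 0 ≤ r < p - 1
lemma pvNegExps_contains (a p r : Int) (hp : 0 < p) (hr0 : 0 ≤ r) (hr : r < p - 1) :
    PySem.Set.contains (pvNegExps a p) r = (a ^ r.toNat % p == p - 1) := by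
  rw [pvNegExps_eq_filter a p hp]
  simp only [PySem.Set.contains, List.contains_eq_mem, List.mem_filter,
    PySem.List.mem_pyRange_one]
  by_cases h : a ^ r.toNat % p == p - 1
  · simp [h, hr0, hr]
  · simp [h]

-- the innermost test of A equals B's membership test, for p ≥ 3
lemma pv_inner_eq (p a b c : Int) (hp : 3 ≤ p) :
    (PySem.Int.powMod a
        (PySem.Int.mod (PySem.Int.mod b (p-1) * PySem.Int.mod c (p-1)) (p-1)).toNat p
      == p - 1)
    = PySem.Set.contains (pvNegExps a p) (PySem.Int.mod (b * c) (p-1)) := by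
  have hcyc : (0:Int) < p - 1 := by omega
  have hp0 : (0:Int) < p := by omega
  rw [PySem.Int.mod_eq_emod_of_pos hcyc, PySem.Int.mod_eq_emod_of_pos hcyc,
      PySem.Int.mod_eq_emod_of_pos hcyc, PySem.Int.mod_eq_emod_of_pos hcyc]
  have hexp : (b % (p-1)) * (c % (p-1)) % (p-1) = b * c % (p-1) := by
    conv_lhs => rw [Int.mul_emod]
    conv_rhs => rw [Int.mul_emod]
    simp only [Int.emod_emod_of_dvd _ (dvd_refl (p-1))]
  rw [hexp]
  set r : Int := b * c % (p-1) with hr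
  have hr0 : 0 ≤ r := Int.emod_nonneg _ (by omega)
  have hrlt : r < p - 1 := Int.emod_lt_of_pos _ hcyc
  rw [pvNegExps_contains a p r hp0 hr0 hrlt, PySem.Int.powMod_eq_emod a _ hp0]

-- ===== VERDICT (by name: the statement is the Claim_ definition above) =====
theorem find_all_triples_spec : Claim_equal_find_all_triples := by
  intro p _
  unfold Spec_find_all_triples find_all_triples find_all_triples_alt
  by_cases hp : 3 ≤ p
  · apply PySem.List.foldl_congr_mem
    intro acc a _
    by_cases hg : Int.gcd a p = 1
    · rw [if_neg (show ¬(Int.gcd a p ≠ 1) by simp [hg]),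
          if_pos (show (Int.gcd a p == 1) = true by simp [hg])]
      rw [PySem.List.foldl_congr_mem
        (g := fun triples b =>
          triples ++ ((PySem.List.pyRange 2 p 1).filter
            (fun c => PySem.Set.contains (pvNegExps a p)
              (PySem.Int.mod (b * c) (p - 1)))).map (fun c => [a, b, c]))]
      · rw [PySem.List.foldl_append_eq_flatMap]
      · intro acc' b _
        show List.foldl (fun triples c =>
            if (PySem.Int.powMod a (PySem.Int.mod
                (PySem.Int.mod b (p-1) * PySem.Int.mod c (p-1)) (p-1)).toNat p == p - 1) = true
            then triples ++ [[a, b, c]] else triples) acc' (PySem.List.pyRange 2 p 1) = _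
        rw [show (fun triples c =>
              if PySem.Int.powMod a (PySem.Int.mod
                  (PySem.Int.mod b (p-1) * PySem.Int.mod c (p-1)) (p-1)).toNat p == p - 1
              then triples ++ [[a, b, c]] else triples)
            = (fun triples c =>
              if PySem.Set.contains (pvNegExps a p) (PySem.Int.mod (b * c) (p-1)) = true
              then triples ++ [[a, b, c]] else triples) from by
          funext triples c
          rw [← pv_inner_eq p a b c hp]]
        exact PySem.List.foldl_append_if _ _ _ _
    · simp [hg]
  · have hnil : PySem.List.pyRange 2 p 1 = [] := PySem.List.pyRange_one_eq_nil (by omega)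
    simp [hnil]
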